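-- pv_equiv track=rewrite | github.com/MarisGomez/intro-programacion | Parciales y Tp grupal/repaso_final_Python.py | es_lista_valida
-- ===== SOURCE A (Python) =====
-- def es_lista_valida(fila: list[int]) -> bool:
--     apariciones: list[int] = []
--
--     for numero in fila:
--         if 1 <= numero <= 9:
--             if numero not in apariciones:
--                 apariciones.append(numero)
--             else:
--                 return False
--     return True
-- ===== SOURCE B (Python) =====
-- def es_lista_valida(fila: list[int]) -> bool:
--     counts = [0] * 10
--     for numero in fila:
--         if 1 <= numero <= 9:
--             counts[numero] += 1
--     return all(c <= 1 for c in counts)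
-- ===== Notes on version B (the rewrite author's own statement) =====
-- stated objective: alternative
-- what changed: Replaced the seen-list with membership test and early return by a fixed array of 10 bucket counters filled in one pass, validity then being that every bucket count is at most 1.
import Mathlib
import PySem

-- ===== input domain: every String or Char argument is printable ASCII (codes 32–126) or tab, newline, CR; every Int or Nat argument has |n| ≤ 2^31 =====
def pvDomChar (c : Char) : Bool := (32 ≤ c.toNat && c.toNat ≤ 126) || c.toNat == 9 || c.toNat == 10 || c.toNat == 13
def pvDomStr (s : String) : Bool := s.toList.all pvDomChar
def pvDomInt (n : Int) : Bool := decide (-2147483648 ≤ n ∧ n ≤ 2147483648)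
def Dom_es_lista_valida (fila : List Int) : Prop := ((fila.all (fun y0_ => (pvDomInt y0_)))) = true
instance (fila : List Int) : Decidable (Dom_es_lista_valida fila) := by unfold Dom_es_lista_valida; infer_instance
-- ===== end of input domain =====

-- B counts each in-range value into a fixed array of 10 buckets in one pass and checks every
-- bucket holds at most 1, instead of A's seen-list membership loop with early return; objective: alternative.

-- ===== PORT A =====
-- loop 'for numero in fila' with the accumulator 'apariciones'
def pvLoopA (fila acc : List Int) : Bool :=
  match fila with
  | [] => true
  | n :: rest =>
    if 1 ≤ n ∧ n ≤ 9 then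
      if n ∈ acc then false
      else pvLoopA rest (acc ++ [n])
    else pvLoopA rest acc

def es_lista_valida (fila : List Int) : Bool := pvLoopA fila []

-- ===== PORT B =====
-- loop 'for numero in fila' updating counts[numero] += 1; the index n is guaranteed 1..9 by the
-- branch, so 'n.toNat' is exact for Python's counts[n] here.
def pvLoopB (fila counts : List Int) : List Int :=
  match fila with
  | [] => counts
  | n :: rest =>
    if 1 ≤ n ∧ n ≤ 9 then
      pvLoopB rest (counts.set n.toNat (counts.getD n.toNat 0 + 1))
    else pvLoopB rest counts

def es_lista_valida_alt (fila : List Int) : Bool :=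
  (pvLoopB fila (List.replicate 10 0)).all (fun c => c ≤ 1)

-- ===== PRECONDITION & SPEC =====
def Spec_es_lista_valida (fila : List Int) (out : Bool) : Prop := out = es_lista_valida_alt fila
instance (fila : List Int) (out : Bool) : Decidable (Spec_es_lista_valida fila out) := by unfold Spec_es_lista_valida; infer_instance

-- ===== CLAIM =====
def Claim_equal_es_lista_valida : Prop := ∀ (fila : List Int), Dom_es_lista_valida fila → Spec_es_lista_valida fila (es_lista_valida fila)

-- ===== LEMMAS AND PROOFS =====

-- A's loop succeeds exactly when acc ++ the in-range values is duplicate-free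
theorem pvLoopA_iff (fila acc : List Int) (h : acc.Nodup) :
    pvLoopA fila acc = true ↔ (acc ++ fila.filter (fun n => decide (1 ≤ n ∧ n ≤ 9))).Nodup := by
  induction fila generalizing acc with
  | nil => simp [pvLoopA, h]
  | cons n rest ih =>
    by_cases hp : 1 ≤ n ∧ n ≤ 9
    · by_cases hm : n ∈ acc
      · simp only [pvLoopA, if_pos hp, if_pos hm]
        constructor
        · intro hfalse; cases hfalse
        · intro hnd
          exfalso
          rw [List.filter_cons_of_pos (by simpa using hp)] at hnd
          have := List.disjoint_of_nodup_append hnd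
          exact this hm (by simp)
      · simp only [pvLoopA, if_pos hp, if_neg hm]
        rw [ih (acc ++ [n]) (by simp [List.nodup_append, h]; exact fun a ha hq => hm (hq ▸ ha)),
            List.filter_cons_of_pos (by simpa using hp)]
        simp [List.append_assoc]
    · simp only [pvLoopA, if_neg hp]
      rw [ih acc h, List.filter_cons_of_neg (by simpa using hp)]

theorem pvLoopB_length (fila counts : List Int) :
    (pvLoopB fila counts).length = counts.length := by
  induction fila generalizing counts with
  | nil => rfl
  | cons n rest ih =>
    by_cases hp : 1 ≤ n ∧ n ≤ 9
    · simp [pvLoopB, if_pos hp, ih]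
    · simp [pvLoopB, if_neg hp, ih]

-- each bucket ends at its start plus the number of in-range occurrences of its index
theorem pvLoopB_getD (fila : List Int) (counts : List Int) (hlen : counts.length = 10)
    (i : Nat) (hi : i < 10) :
    (pvLoopB fila counts).getD i 0 =
      counts.getD i 0 + ((fila.filter (fun n => decide (1 ≤ n ∧ n ≤ 9))).count (i : Int)) := by
  induction fila generalizing counts with
  | nil => simp [pvLoopB]
  | cons n rest ih =>
    by_cases hp : 1 ≤ n ∧ n ≤ 9
    · have hnn : (0:Int) ≤ n := le_trans (by norm_num) hp.1
      have hcast : ((n.toNat : Int)) = n := Int.toNat_of_nonneg hnn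
      have hlt : n.toNat < 10 := by omega
      simp only [pvLoopB, if_pos hp]
      rw [ih _ (by simp [hlen])]
      rw [List.filter_cons_of_pos (by simpa using hp)]
      by_cases hin : i = n.toNat
      · subst hin
        rw [List.getD_eq_getElem?_getD, List.getElem?_set_self (by omega)]
        simp [List.getD_eq_getElem?_getD, hcast]
        omega
      · have hne : (i : Int) ≠ n := by omega
        rw [List.getD_eq_getElem?_getD, List.getElem?_set_ne (by omega)]
        simp only [List.getD_eq_getElem?_getD, List.count_cons]
        have hne2 : ¬ n = (i : Int) := fun h => hne h.symm
        simp [hne2]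
    · simp only [pvLoopB, if_neg hp]
      rw [ih _ hlen, List.filter_cons_of_neg (by simpa using hp)]

theorem altB_iff (fila : List Int) :
    es_lista_valida_alt fila = true ↔
      (fila.filter (fun n => decide (1 ≤ n ∧ n ≤ 9))).Nodup := by
  unfold es_lista_valida_alt
  have hlen : (pvLoopB fila (List.replicate 10 0)).length = 10 := by
    rw [pvLoopB_length]; simp
  constructor
  · intro hall
    rw [List.nodup_iff_count_le_one]
    intro a
    by_cases ha : a ∈ fila.filter (fun n => decide (1 ≤ n ∧ n ≤ 9))
    · have hrange : 1 ≤ a ∧ a ≤ 9 := by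
        have := List.of_mem_filter ha; simpa using this
      have hnn : (0:Int) ≤ a := le_trans (by norm_num) hrange.1
      have hcast : ((a.toNat : Int)) = a := Int.toNat_of_nonneg hnn
      have hlt : a.toNat < 10 := by omega
      have hg := pvLoopB_getD fila (List.replicate 10 0) (by simp) a.toNat hlt
      rw [hcast] at hg
      have hmem : (pvLoopB fila (List.replicate 10 0)).getD a.toNat 0
          ∈ pvLoopB fila (List.replicate 10 0) := by
        rw [List.getD_eq_getElem?_getD, List.getElem?_eq_getElem (by omega)]
        simp [List.getElem_mem]
      have hle := List.all_eq_true.mp hall _ hmem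
      simp only [decide_eq_true_eq] at hle
      rw [hg] at hle
      simp only [List.getD_eq_getElem?_getD, List.getElem?_replicate, if_pos hlt,
        Option.getD_some] at hle
      omega
    · rw [List.count_eq_zero_of_not_mem (by simpa using ha)]
      norm_num
  · intro hnd
    rw [List.all_eq_true]
    intro c hc
    obtain ⟨i, hi, hci⟩ := List.mem_iff_getElem.mp hc
    have hi10 : i < 10 := by omega
    have hg := pvLoopB_getD fila (List.replicate 10 0) (by simp) i hi10
    rw [List.getD_eq_getElem?_getD, List.getElem?_eq_getElem (by omega), hci] at hg
    simp only [Option.getD_some, List.getD_eq_getElem?_getD, List.getElem?_replicate,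
      if_pos hi10] at hg
    have hcount : (fila.filter (fun n => decide (1 ≤ n ∧ n ≤ 9))).count (i : Int) ≤ 1 :=
      List.nodup_iff_count_le_one.mp hnd _
    simp only [decide_eq_true_eq]
    omega

-- ===== VERDICT =====
theorem es_lista_valida_spec : Claim_equal_es_lista_valida := by
  intro fila _
  unfold Spec_es_lista_valida es_lista_valida
  have hA : pvLoopA fila [] = true ↔
      (fila.filter (fun n => decide (1 ≤ n ∧ n ≤ 9))).Nodup := by
    rw [pvLoopA_iff fila [] List.nodup_nil]; simp
  rw [Bool.eq_iff_iff, hA, altB_iff]
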